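-- pv_equiv track=rewrite | github.com/jramaswami/Binary_Search_Python | largest_elements_in_their_row_and_column.py | solve
-- ===== SOURCE A (Python) =====
-- def solve(matrix):
--     if not matrix:
--         return 0
--
--     sums_by_row = [sum(row) for row in matrix]
--     sums_by_col = [0 for _ in matrix[0]]
--     for c, _ in enumerate(matrix[0]):
--         for row in matrix:
--             sums_by_col[c] += row[c]
--
--     soln = 0
--     for r, row in enumerate(matrix):
--         for c, val in enumerate(row):
--             if val == 1 and sums_by_row[r] == 1 and sums_by_col[c] == 1:
--                 soln += 1
--     return soln
-- ===== SOURCE B (Python) =====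
-- def solve(matrix):
--     def col_sum(c):
--         return sum(row[c] for row in matrix)
--
--     total = 0
--     for row in matrix:
--         if sum(row) == 1:
--             for c, val in enumerate(row):
--                 if val == 1 and col_sum(c) == 1:
--                     total += 1
--     return total
-- ===== Notes on version B (the rewrite author's own statement) =====
-- stated objective: alternative
-- what changed: B drops A's precomputed row-sum and column-sum tables and its full R*C cell scan: it filters rows by their sum on the fly and recomputes the column sum lazily (a fresh column scan) only at candidate 1-cells in a sum-1 row.
import Mathlib
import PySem

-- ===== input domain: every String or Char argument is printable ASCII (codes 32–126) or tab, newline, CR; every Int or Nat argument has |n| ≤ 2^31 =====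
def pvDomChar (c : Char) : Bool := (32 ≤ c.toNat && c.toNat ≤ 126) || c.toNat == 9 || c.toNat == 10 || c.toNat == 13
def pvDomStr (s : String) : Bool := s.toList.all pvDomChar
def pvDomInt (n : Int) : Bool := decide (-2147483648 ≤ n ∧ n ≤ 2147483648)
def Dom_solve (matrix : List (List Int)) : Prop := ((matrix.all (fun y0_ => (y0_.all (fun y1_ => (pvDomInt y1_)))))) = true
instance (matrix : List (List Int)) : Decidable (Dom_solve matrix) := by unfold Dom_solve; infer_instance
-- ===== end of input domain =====

-- B is demand-driven: no precomputed row/column sum tables and no full cell scan — rows are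
-- filtered by their sum on the fly and the column sum is recomputed lazily only at candidate 1-cells.

-- ===== PORT A =====
-- Literal port of A.  Python's row[c] / sums_by_col[c] / sums_by_row[r] indexing is ported with
-- pyGetD/pySetD; on Pre_solve inputs every such index is in range, so the defaults are never read.
def solve (matrix : List (List Int)) : Int :=
  if matrix = [] then 0
  else
    let sumsByRow : List Int := matrix.map (fun row => row.sum)
    let sumsByCol0 : List Int := (matrix.headD []).map (fun _ => (0 : Int))
    let sumsByCol : List Int :=
      (PySem.List.enumerate (matrix.headD [])).foldl (fun sc p =>
        matrix.foldl (fun sc row =>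
          PySem.List.pySetD sc p.1 (PySem.List.pyGetD sc p.1 0 + PySem.List.pyGetD row p.1 0)) sc) sumsByCol0
    (PySem.List.enumerate matrix).foldl (fun soln rp =>
      (PySem.List.enumerate rp.2).foldl (fun soln cp =>
        if (cp.2 == 1 && PySem.List.pyGetD sumsByRow rp.1 0 == 1
              && PySem.List.pyGetD sumsByCol cp.1 0 == 1) then soln + 1 else soln) soln) 0

-- ===== PORT B =====
-- Literal port of Source B; col_sum's row[c] is ported with pyGetD (in range on Pre_solve inputs).
def solve_alt (matrix : List (List Int)) : Int :=
  matrix.foldl (fun total row =>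
    if row.sum == 1 then
      (PySem.List.enumerate row).foldl (fun total cp =>
        if (cp.2 == 1 && (matrix.map (fun r => PySem.List.pyGetD r cp.1 0)).sum == 1)
        then total + 1 else total) total
    else total) 0

-- ===== PRECONDITION & SPEC =====
-- Pre_solve is exactly A's return domain: every row at least as long as the first row, and no row
-- of sum 1 carries a 1 at a column index ≥ the first row's length — on the excluded inputs A's
-- sums_by_col indexing raises IndexError.
def Pre_solve (matrix : List (List Int)) : Prop :=
  (∀ row ∈ matrix, (matrix.headD []).length ≤ row.length) ∧
  (∀ row ∈ matrix, row.sum = 1 → ∀ c < row.length, (matrix.headD []).length ≤ c → row.getD c 0 ≠ 1)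
instance (matrix : List (List Int)) : Decidable (Pre_solve matrix) := by unfold Pre_solve; infer_instance

def pvWitness_solve : List (List Int) := [[1, 0], [0, 1]]

def Spec_solve (matrix : List (List Int)) (out : Int) : Prop := out = solve_alt matrix
instance (matrix : List (List Int)) (out : Int) : Decidable (Spec_solve matrix out) := by unfold Spec_solve; infer_instance

-- ===== CLAIM (what is proved, stated in full; the proofs are below) =====
def Claim_equal_solve : Prop := ∀ (matrix : List (List Int)), Dom_solve matrix → Pre_solve matrix → Spec_solve matrix (solve matrix)

-- ===== LEMMAS AND PROOFS =====

-- column sum of column c (entries past a row's end read as 0; on Pre_solve inputs they never are)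
def csum (m : List (List Int)) (c : Nat) : Int := (m.map (fun row => row.getD c 0)).sum

theorem enumerate_eq_range {α : Type} (xs : List α) (d : α) (s : Nat) :
    PySem.List.enumerate xs (s : Int) = (List.range xs.length).map (fun i => (((s + i : Nat) : Int), xs.getD i d)) := by
  induction xs generalizing s with
  | nil => simp [PySem.List.enumerate]
  | cons x xs ih =>
    rw [PySem.List.enumerate_cons]
    have : ((s : Int) + 1) = ((s + 1 : Nat) : Int) := by push_cast; ring
    rw [this, ih (s + 1)]
    simp [List.range_succ_eq_map, List.map_map, Function.comp]
    intro a _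
    ring

theorem innerA (m : List (List Int)) (sc : List Int) (c : Nat) (hc : c < sc.length) :
    m.foldl (fun sc row =>
      PySem.List.pySetD sc ((c : Nat) : Int) (PySem.List.pyGetD sc ((c : Nat) : Int) 0 + PySem.List.pyGetD row ((c : Nat) : Int) 0)) sc
    = sc.set c (sc.getD c 0 + csum m c) := by
  induction m generalizing sc with
  | nil =>
    simp only [List.foldl_nil, csum, List.map_nil, List.sum_nil, add_zero]
    rw [List.getD_eq_getElem sc 0 hc]
    exact (List.set_getElem_self hc).symm
  | cons row rest ih =>
    simp only [List.foldl_cons, PySem.List.pySetD_natCast, PySem.List.pyGetD_natCast] at ih ⊢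
    rw [ih _ (by simpa using hc)]
    rw [List.set_set]
    congr 1
    rw [List.getD_eq_getElem _ 0 (by simpa using hc), List.getElem_set_self (by simpa using hc),
        List.getD_eq_getElem sc 0 hc]
    simp [csum]
    ring

theorem rangeA (m : List (List Int)) (k : Nat) (sc : List Int) (h : k ≤ sc.length) :
    ((List.range k).foldl (fun sc (y : Nat) =>
        m.foldl (fun sc row =>
          PySem.List.pySetD sc (↑y) (PySem.List.pyGetD sc (↑y) 0 + PySem.List.pyGetD row (↑y) 0)) sc) sc).length = sc.length
    ∧ ∀ c : Nat, ((List.range k).foldl (fun sc (y : Nat) =>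
        m.foldl (fun sc row =>
          PySem.List.pySetD sc (↑y) (PySem.List.pyGetD sc (↑y) 0 + PySem.List.pyGetD row (↑y) 0)) sc) sc).getD c 0
      = if c < k then sc.getD c 0 + csum m c else sc.getD c 0 := by
  induction k with
  | zero => simp
  | succ k ih =>
    obtain ⟨ihl, ihg⟩ := ih (by omega)
    rw [List.range_succ, List.foldl_append, List.foldl_cons, List.foldl_nil]
    rw [innerA m _ k (by rw [ihl]; omega)]
    refine ⟨by simp only [List.length_set]; exact ihl, ?_⟩
    intro c
    by_cases hck : c = k
    · subst hck
      rw [List.getD_eq_getElem _ 0 (by simp only [List.length_set, ihl]; omega),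
          List.getElem_set_self (by simp only [List.length_set, ihl]; omega)]
      rw [ihg c, if_neg (by omega), if_pos (by omega)]
    · by_cases hcl : c < sc.length
      · rw [List.getD_eq_getElem _ 0 (by simp only [List.length_set, ihl]; omega),
            List.getElem_set_ne (by omega),
            ← List.getD_eq_getElem _ 0 (by simp only [ihl]; omega)]
        rw [ihg c]
        split_ifs <;> first | rfl | omega
      · rw [List.getD_eq_default _ 0 (by simp only [List.length_set, ihl]; omega),
            List.getD_eq_default _ 0 (by omega)]
        rw [if_neg (by omega)]

theorem self_eq_map_range_getD (m : List (List Int)) :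
    m = (List.range m.length).map (fun i => m.getD i []) := by
  apply List.ext_getElem
  · simp
  · intro i h1 h2
    simp only [List.getElem_map, List.getElem_range]
    rw [List.getD_eq_getElem m [] h1]

theorem main (m : List (List Int)) (hpre : Pre_solve m) : solve m = solve_alt m := by
  obtain ⟨hge, hno⟩ := hpre
  by_cases hm : m = []
  · simp [hm, solve, solve_alt]
  · unfold solve solve_alt
    simp only [if_neg hm]
    rw [show PySem.List.enumerate m = PySem.List.enumerate m ((0 : Nat) : Int) by norm_num,
        enumerate_eq_range m [] 0]
    rw [show PySem.List.enumerate (m.headD []) = PySem.List.enumerate (m.headD []) ((0 : Nat) : Int) by norm_num,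
        enumerate_eq_range (m.headD []) 0 0]
    simp only [Nat.zero_add, List.foldl_map]
    -- A's column-sum array, element by element
    obtain ⟨-, hAcol⟩ := rangeA m (m.headD []).length (List.map (fun _ => (0:Int)) (m.headD []))
      (by simp)
    have hsc0 : ∀ c : Nat, (List.map (fun _ => (0:Int)) (m.headD [])).getD c 0 = 0 := by
      intro c
      by_cases hc : c < (m.headD []).length
      · rw [List.getD_eq_getElem _ 0 (by simpa using hc), List.getElem_map]
      · rw [List.getD_eq_default _ 0 (by simpa using not_lt.mp hc)]
    -- fold B over the same index range
    conv_rhs => rw [self_eq_map_range_getD m]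
    rw [List.foldl_map]
    apply PySem.List.foldl_congr_mem
    intro acc i hi
    have hiR : i < m.length := List.mem_range.mp hi
    have hrowmem : m.getD i [] ∈ m := by
      rw [List.getD_eq_getElem m [] hiR]; exact List.getElem_mem hiR
    have hsum : PySem.List.pyGetD (List.map (fun row => row.sum) m) ((i : Nat) : Int) 0
        = (m.getD i []).sum := by
      rw [PySem.List.pyGetD_natCast, List.getD_eq_getElem _ _ (by simpa using hiR), List.getElem_map,
          ← List.getD_eq_getElem _ _ hiR]
    simp only [hsum]
    by_cases hrs : (m.getD i []).sum = 1
    · rw [if_pos (beq_iff_eq.mpr hrs)]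
      apply PySem.List.foldl_congr_mem
      intro acc' cp hcp
      obtain ⟨k, hk, rfl⟩ := (PySem.List.mem_enumerate_iff _ _ _).mp hcp
      simp only [zero_add]
      have hcolB : (List.map (fun r => PySem.List.pyGetD r ((k : Nat) : Int) 0)
          (List.map (fun i => m.getD i []) (List.range m.length))).sum = csum m k := by
        rw [← self_eq_map_range_getD m]
        simp only [PySem.List.pyGetD_natCast, csum]
      rw [hcolB]
      have hcolA : PySem.List.pyGetD
          ((List.range (m.headD []).length).foldl (fun sc (y : Nat) =>
            m.foldl (fun sc row =>
              PySem.List.pySetD sc (↑y) (PySem.List.pyGetD sc (↑y) 0 + PySem.List.pyGetD row (↑y) 0)) sc)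
            (List.map (fun _ => (0:Int)) (m.headD []))) ((k : Nat) : Int) 0
          = if k < (m.headD []).length then csum m k else 0 := by
        rw [PySem.List.pyGetD_natCast, hAcol k, hsc0 k]
        split_ifs <;> ring
      rw [hcolA]
      have hrs' : (m[i]?.getD []).sum = 1 := hrs
      by_cases hkH : k < (m.headD []).length
      · rw [if_pos hkH]
        simp [hrs']
      · rw [if_neg hkH]
        have hne : (m.getD i [])[k] ≠ 1 := by
          have := hno _ hrowmem hrs k hk (by omega)
          rwa [List.getD_eq_getElem _ 0 hk] at this
        have hb : (((m.getD i [])[k] : Int) == 1) = false := by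
          rw [beq_eq_false_iff_ne]; exact hne
        rw [hb]
        simp
    · rw [if_neg (fun hb => hrs (beq_iff_eq.mp hb))]
      have hmid : (((m.getD i []).sum == 1)) = false := by rw [beq_eq_false_iff_ne]; exact hrs
      rw [PySem.List.foldl_congr_mem _ _ (fun (a : Int) (_ : Int × Int) => a) acc
        (by intro a cp _; rw [hmid]; simp)]
      exact List.foldl_fixed _

-- ===== VERDICT (by name: the statement is the Claim_ definition above) =====
theorem solve_spec : Claim_equal_solve := by
  intro matrix _ hpre
  show solve matrix = solve_alt matrix
  exact main matrix hpre
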